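-- pv_equiv track=rewrite | github.com/zjc2023/MaaGumballs | agent/action/FindStoveSequence.py | split_zero_sequence_advanced
-- ===== SOURCE A (Python) =====
-- def split_zero_sequence_advanced(input_list):
--     """
--     用来处理101序列，返回垫子序列和日光装备等级序列
--     参数:
--         input_list (list): 输入列表，例如 [5,3]
--     返回:
--         zero_counts (list): 包含开头零、非零间零和结尾零的列表，如 [0]
--         non_zero_values (list): 非零值列表，如 [5,3]
--     """
--     zero_counts = []
--     non_zero_values = []
--     current_index = 0
--     list_length = len(input_list)
--
--     # 处理开头的零
--     has_leading_zeros = False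
--     while current_index < list_length and input_list[current_index] == 0:
--         current_index += 1
--         has_leading_zeros = True
--     if has_leading_zeros:
--         zero_counts.append(current_index)
--     else:
--         # 如果没有前导零，并且列表不为空，则添加一个0
--         if list_length > 0:
--             zero_counts.append(0)
--
--     # 处理中间的非零值和零
--     previous_was_non_zero = False
--
--     while current_index < list_length:
--         current_value = input_list[current_index]
--
--         if current_value != 0:
--             # 遇到非零值
--             non_zero_values.append(current_value)
--
--             if previous_was_non_zero:
--                 # 如果前一个也是非零值，记录0表示它们之间没有零
--                 zero_counts.append(0)
--             previous_was_non_zero = True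
--         else:
--             # 遇到零
--             previous_was_non_zero = False
--
--             # 计算连续零的数量
--             consecutive_zeros = 1
--             current_index += 1
--             while current_index < list_length and input_list[current_index] == 0:
--                 consecutive_zeros += 1
--                 current_index += 1
--
--             # 添加连续零的数量到结果
--             zero_counts.append(consecutive_zeros)
--             continue  # 跳过下面的索引递增，因为在内层循环中已经处理过了
--
--         current_index += 1
--
--     # 处理结尾的零
--     # （在当前逻辑中，结尾的零已经在主循环中处理，无需额外步骤）
--
--     # 处理空输入的情况
--     if not non_zero_values and not zero_counts and list_length > 0:
--         zero_counts.append(list_length)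
--
--     return zero_counts, non_zero_values
-- ===== SOURCE B (Python) =====
-- def split_zero_sequence_advanced(input_list):
--     # Two-phase re-implementation: first build a runs table (maximal runs of
--     # zeros / non-zeros), then emit both outputs in one pass over the runs.
--     if not input_list:
--         return [], []
--     # phase 1: runs table, each run is (is_zero, values)
--     runs = []
--     n = len(input_list)
--     i = 0
--     while i < n:
--         is_zero = (input_list[i] == 0)
--         j = i
--         while j < n and (input_list[j] == 0) == is_zero:
--             j += 1
--         runs.append((is_zero, input_list[i:j]))
--         i = j
--     # phase 2: emission
--     zero_counts = [] if runs[0][0] else [0]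
--     non_zero_values = []
--     for is_zero, vals in runs:
--         if is_zero:
--             zero_counts.append(len(vals))
--         else:
--             non_zero_values.extend(vals)
--             zero_counts.extend([0] * (len(vals) - 1))
--     return zero_counts, non_zero_values
-- ===== Notes on version B (the rewrite author's own statement) =====
-- stated objective: alternative
-- what changed: Replaced A's single interleaved index-walk (nested while loops, a previous-was-nonzero flag and a manual continue) by a two-phase algorithm: build a table of maximal zero/non-zero runs, then assemble both output lists in one pass over that table.
import Mathlib
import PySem

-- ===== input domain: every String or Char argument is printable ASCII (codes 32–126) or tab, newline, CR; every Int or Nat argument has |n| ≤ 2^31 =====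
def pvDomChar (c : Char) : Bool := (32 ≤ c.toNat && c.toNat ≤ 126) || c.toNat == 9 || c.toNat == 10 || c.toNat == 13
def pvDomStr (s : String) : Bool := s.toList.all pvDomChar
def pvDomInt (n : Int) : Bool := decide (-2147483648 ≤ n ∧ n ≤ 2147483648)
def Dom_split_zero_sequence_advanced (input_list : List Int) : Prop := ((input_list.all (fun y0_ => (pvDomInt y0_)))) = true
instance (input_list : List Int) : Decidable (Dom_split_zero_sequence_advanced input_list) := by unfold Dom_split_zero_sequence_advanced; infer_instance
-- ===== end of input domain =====

-- B replaces A's interleaved index-walk by a two-phase algorithm (runs table, then emission pass); same cost, proved equal on all inputs.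


-- ===== PORT A =====
-- A's first while loop: skip leading zeros, returning their count and the rest.
def pvSkipZeros : List Int → Nat × List Int
  | [] => (0, [])
  | x :: xs => if x = 0 then ((pvSkipZeros xs).1 + 1, (pvSkipZeros xs).2) else (0, x :: xs)

theorem pvSkipZeros_length : ∀ xs : List Int, (pvSkipZeros xs).2.length ≤ xs.length := by
  intro xs
  induction xs with
  | nil => simp [pvSkipZeros]
  | cons x xs ih =>
    by_cases h : x = 0 <;> simp [pvSkipZeros, h] <;> omega

-- A's main while loop over the remaining list, with the previous_was_non_zero flag
-- and the accumulated zero_counts / non_zero_values.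
def pvMain : List Int → Bool → List Int → List Int → List Int × List Int
  | [], _, zc, nzv => (zc, nzv)
  | x :: xs, prev, zc, nzv =>
    if x ≠ 0 then
      pvMain xs true (if prev then zc ++ [0] else zc) (nzv ++ [x])
    else
      pvMain (pvSkipZeros (x :: xs)).2 false (zc ++ [((pvSkipZeros (x :: xs)).1 : Int)]) nzv
termination_by xs => xs.length
decreasing_by
  · simp
  · simp_all [pvSkipZeros]
    exact pvSkipZeros_length xs

def split_zero_sequence_advanced (input_list : List Int) : List Int × List Int :=
  let k := (pvSkipZeros input_list).1
  let rest := (pvSkipZeros input_list).2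
  let zc0 : List Int := if k > 0 then [(k : Int)] else (if input_list.length > 0 then [0] else [])
  let r := pvMain rest false zc0 []
  -- A's final dead-code patch for "empty results on nonempty input", ported literally
  if r.2 = [] ∧ r.1 = [] ∧ input_list.length > 0 then (r.1 ++ [(input_list.length : Int)], r.2) else r

-- ===== PORT B =====
-- phase 1 of Source B: the runs table (maximal prefix with the same zero-flag, then the rest)
def pvRunsOf : List Int → List (Bool × List Int)
  | [] => []
  | x :: xs =>
    (decide (x = 0), (x :: xs).takeWhile (fun y => decide (y = 0) == decide (x = 0))) ::
      pvRunsOf ((x :: xs).dropWhile (fun y => decide (y = 0) == decide (x = 0)))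
termination_by xs => xs.length
decreasing_by
  simp_all [List.dropWhile]
  have := List.length_dropWhile_le (fun y : Int => decide (y = 0) == decide (x = 0)) xs
  omega

-- phase 2 of Source B: the emission pass over the runs table
def pvEmit (runs : List (Bool × List Int)) (init : List Int × List Int) : List Int × List Int :=
  runs.foldl (fun acc run =>
    if run.1 then (acc.1 ++ [(run.2.length : Int)], acc.2)
    else (acc.1 ++ List.replicate (run.2.length - 1) 0, acc.2 ++ run.2)) init

def split_zero_sequence_advanced_alt (input_list : List Int) : List Int × List Int :=
  if input_list = [] then ([], [])
  else
    let runs := pvRunsOf input_list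
    pvEmit runs ((if ((runs.headD (true, [])).1) then [] else [0]), [])

-- ===== PRECONDITION & SPEC =====
def Spec_split_zero_sequence_advanced (input_list : List Int) (out : List Int × List Int) : Prop := out = split_zero_sequence_advanced_alt input_list
instance (input_list : List Int) (out : List Int × List Int) : Decidable (Spec_split_zero_sequence_advanced input_list out) := by unfold Spec_split_zero_sequence_advanced; infer_instance

-- ===== CLAIM (what is proved, stated in full; the proofs are below) =====
def Claim_equal_split_zero_sequence_advanced : Prop := ∀ (input_list : List Int), Dom_split_zero_sequence_advanced input_list → Spec_split_zero_sequence_advanced input_list (split_zero_sequence_advanced input_list)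

-- ===== LEMMAS AND PROOFS =====

-- pvSkipZeros is takeWhile/dropWhile on (· = 0)
theorem pvSkipZeros_eq (xs : List Int) :
    pvSkipZeros xs = ((xs.takeWhile (fun y => decide (y = 0))).length, xs.dropWhile (fun y => decide (y = 0))) := by
  induction xs with
  | nil => simp [pvSkipZeros]
  | cons x xs ih =>
    by_cases h : x = 0 <;> simp [pvSkipZeros, h, List.takeWhile, List.dropWhile, ih]

-- one step of the emission pass
theorem pvEmit_cons (b : Bool) (vals : List Int) (rs : List (Bool × List Int)) (init : List Int × List Int) :
    pvEmit ((b, vals) :: rs) init =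
      pvEmit rs (if b then (init.1 ++ [(vals.length : Int)], init.2)
        else (init.1 ++ List.replicate (vals.length - 1) 0, init.2 ++ vals)) := by
  cases b <;> simp [pvEmit]

-- pvEmit only appends to both accumulators
theorem pvEmit_append (rs : List (Bool × List Int)) :
    ∀ zc nzv, pvEmit rs (zc, nzv) =
      (zc ++ (pvEmit rs ([], [])).1, nzv ++ (pvEmit rs ([], [])).2) := by
  induction rs with
  | nil => simp [pvEmit]
  | cons r rs ih =>
    intro zc nzv
    obtain ⟨b, vals⟩ := r
    have step : ∀ (init : List Int × List Int), pvEmit ((b, vals) :: rs) init =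
        pvEmit rs (if b then (init.1 ++ [(vals.length : Int)], init.2)
          else (init.1 ++ List.replicate (vals.length - 1) 0, init.2 ++ vals)) := by
      intro init; cases b <;> simp [pvEmit]
    cases b
    · simp only [step, Bool.false_eq_true, if_false, List.nil_append]
      rw [ih, ih (List.replicate (vals.length - 1) 0) vals]
      simp [List.append_assoc]
    · simp only [step, if_true, List.nil_append]
      rw [ih, ih [(vals.length : Int)] []]
      simp [List.append_assoc]

-- consuming an all-nonzero block with prev = true appends one 0 per element,
-- provided what follows starts with a zero (or is empty)
theorem pvMain_nonzero_block :
    ∀ (vs rest zc nzv : List Int), (∀ v ∈ vs, v ≠ 0) →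
      (rest = [] ∨ (∃ ys, rest = 0 :: ys)) →
      pvMain (vs ++ rest) true zc nzv =
        pvMain rest false (zc ++ List.replicate vs.length 0) (nzv ++ vs) := by
  intro vs
  induction vs with
  | nil =>
    intro rest zc nzv _ hr
    rcases hr with h | ⟨ys, h⟩ <;> subst h <;> simp [pvMain]
  | cons v vs ih =>
    intro rest zc nzv hv hr
    have hv0 : v ≠ 0 := hv v (by simp)
    simp only [List.cons_append, pvMain, if_pos hv0, if_true]
    rw [ih rest (zc ++ [0]) (nzv ++ [v]) (fun w hw => hv w (by simp [hw])) hr]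
    simp [List.replicate_succ, List.append_assoc]

theorem dropWhile_head (p : Int → Bool) : ∀ (xs : List Int),
    xs.dropWhile p = [] ∨ ∃ y ys, xs.dropWhile p = y :: ys ∧ p y = false := by
  intro xs
  induction xs with
  | nil => simp
  | cons x xs ih =>
    by_cases h : p x
    · simpa [List.dropWhile, h] using ih
    · right; exact ⟨x, xs, by simp [List.dropWhile, h], by simp [h]⟩

-- the main correspondence: A's loop over a list = B's emission over its runs table
theorem pvMain_runs : ∀ (n : Nat) (xs : List Int), xs.length ≤ n → ∀ zc nzv,
    pvMain xs false zc nzv = pvEmit (pvRunsOf xs) (zc, nzv) := by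
  intro n
  induction n with
  | zero =>
    intro xs h zc nzv
    have : xs = [] := by cases xs <;> simp_all
    subst this; simp [pvMain, pvRunsOf, pvEmit]
  | succ n ih =>
    intro xs h zc nzv
    match xs with
    | [] => simp [pvMain, pvRunsOf, pvEmit]
    | x :: xs =>
      by_cases hx : x = 0
      · -- zero run
        subst hx
        have hpred : (fun y : Int => decide (y = 0) == decide ((0:Int) = 0)) = (fun y : Int => decide (y = 0)) := by
          funext y; simp
        rw [pvRunsOf, hpred]
        simp only [pvMain, ne_eq, not_true_eq_false, if_false, reduceIte]
        rw [pvSkipZeros_eq]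
        simp only [pvEmit, List.foldl_cons, decide_eq_true_eq, if_pos rfl]
        have hlt : (List.dropWhile (fun y : Int => decide (y = 0)) (0 :: xs)).length ≤ n := by
          have := List.length_dropWhile_le (fun y : Int => decide (y = 0)) xs
          simp only [List.dropWhile, decide_true] at *
          simp at h; omega
        rw [ih _ hlt]
        have hlen : ((List.takeWhile (fun y : Int => decide (y = 0)) (0 :: xs)).length : Int)
            = (((0:Int) :: xs).takeWhile (fun y => decide (y = 0))).length := rfl
        rfl
      · -- nonzero run
        have hpred : (fun y : Int => decide (y = 0) == decide (x = 0)) = (fun y : Int => !decide (y = 0)) := by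
          funext y; simp [hx]
        rw [pvRunsOf, hpred]
        have hsplit : xs = xs.takeWhile (fun y : Int => !decide (y = 0)) ++ xs.dropWhile (fun y : Int => !decide (y = 0)) :=
          (List.takeWhile_append_dropWhile).symm
        have htw : ∀ v ∈ xs.takeWhile (fun y : Int => !decide (y = 0)), v ≠ 0 := by
          intro v hv
          have := List.mem_takeWhile_imp hv
          simpa using this
        have hdw : xs.dropWhile (fun y : Int => !decide (y = 0)) = [] ∨
            ∃ ys, xs.dropWhile (fun y : Int => !decide (y = 0)) = 0 :: ys := by
          rcases dropWhile_head (fun y : Int => !decide (y = 0)) xs with h0 | ⟨y, ys, h1, h2⟩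
          · exact Or.inl h0
          · right; refine ⟨ys, ?_⟩; simp at h2; rw [h1, h2]
        simp only [pvMain, ne_eq, hx, not_false_eq_true, if_pos, if_neg]
        conv_lhs => rw [hsplit]
        rw [pvMain_nonzero_block _ _ _ _ htw hdw]
        have hlt : (xs.dropWhile (fun y : Int => !decide (y = 0))).length ≤ n := by
          have := List.length_dropWhile_le (fun y : Int => !decide (y = 0)) xs
          simp at h; omega
        rw [ih _ hlt]
        simp only [pvEmit, List.foldl_cons, List.takeWhile, hx, decide_false, Bool.not_false,
          List.dropWhile, decide_eq_true_eq]
        simp [List.append_assoc]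

-- the first accumulator of the emission pass keeps its seed as a prefix
theorem pvEmit_fst_ne_nil (rs : List (Bool × List Int)) (zc nzv : List Int) (h : zc ≠ []) :
    (pvEmit rs (zc, nzv)).1 ≠ [] := by
  rw [pvEmit_append]; simp [h]

-- ===== VERDICT (by name: the statement is the Claim_ definition above) =====
theorem split_zero_sequence_advanced_spec : Claim_equal_split_zero_sequence_advanced := by
  intro input_list _
  unfold Spec_split_zero_sequence_advanced split_zero_sequence_advanced split_zero_sequence_advanced_alt
  match input_list with
  | [] => simp [pvSkipZeros, pvMain, pvRunsOf, pvEmit]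
  | x :: xs =>
    by_cases hx : x = 0
    · subst hx
      have hpred : (fun y : Int => decide (y = 0) == decide ((0:Int) = 0)) = (fun y : Int => decide (y = 0)) := by
        funext y; simp
      have hruns : pvRunsOf (0 :: xs) =
          (true, 0 :: xs.takeWhile (fun y : Int => decide (y = 0))) ::
            pvRunsOf (xs.dropWhile (fun y : Int => decide (y = 0))) := by
        rw [pvRunsOf, hpred]; simp [List.takeWhile, List.dropWhile]
      have hmain := pvMain_runs (xs.dropWhile (fun y : Int => decide (y = 0))).length _ le_rfl
      have hne := pvEmit_fst_ne_nil (pvRunsOf (xs.dropWhile (fun y : Int => decide (y = 0))))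
      simp [pvSkipZeros_eq, List.takeWhile, List.dropWhile, hruns, hmain, pvEmit_cons, hne]
    · have hpred : (fun y : Int => decide (y = 0) == decide (x = 0)) = (fun y : Int => !decide (y = 0)) := by
        funext y; simp [hx]
      have hruns : pvRunsOf (x :: xs) =
          (false, x :: xs.takeWhile (fun y : Int => !decide (y = 0))) ::
            pvRunsOf (xs.dropWhile (fun y : Int => !decide (y = 0))) := by
        rw [pvRunsOf, hpred]; simp [List.takeWhile, List.dropWhile, hx]
      have hmain := pvMain_runs (x :: xs).length _ le_rfl
      have hne := pvEmit_fst_ne_nil (pvRunsOf (xs.dropWhile (fun y : Int => !decide (y = 0))))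
      simp [pvSkipZeros_eq, List.takeWhile, List.dropWhile, hx, hruns, hmain, pvEmit_cons, hne]
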